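-- pv_equiv track=rewrite | github.com/AdVardA/TeamUp_proj | Work_proj/teemup/backend/TeamedUp/views.py | two_in_row
-- ===== SOURCE A (Python) =====
-- def two_in_row(temp):
--     """ two in row """
--     tem_data = []
--     i = 0
--     while i < len(temp):
--         arr = []
--         arr.append(temp[i])
--         if (i + 1) < len(temp):
--             arr.append(temp[i + 1])
--         i += 2
--         tem_data.append(arr)
--
--     return tem_data
-- ===== SOURCE B (Python) =====
-- def two_in_row(temp):
--     """ two in row """
--     tem_data = []
--     for idx, x in enumerate(temp):
--         if idx % 2 == 0:
--             tem_data.append([x])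
--         else:
--             tem_data[-1].append(x)
--     return tem_data
-- ===== Notes on version B (the rewrite author's own statement) =====
-- stated objective: alternative
-- what changed: Replaces the index-stepping while loop (i += 2) that slices out each pair with a single element-by-element enumerate pass that starts a new group on even indices and appends to the last group on odd indices.
import Mathlib
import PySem

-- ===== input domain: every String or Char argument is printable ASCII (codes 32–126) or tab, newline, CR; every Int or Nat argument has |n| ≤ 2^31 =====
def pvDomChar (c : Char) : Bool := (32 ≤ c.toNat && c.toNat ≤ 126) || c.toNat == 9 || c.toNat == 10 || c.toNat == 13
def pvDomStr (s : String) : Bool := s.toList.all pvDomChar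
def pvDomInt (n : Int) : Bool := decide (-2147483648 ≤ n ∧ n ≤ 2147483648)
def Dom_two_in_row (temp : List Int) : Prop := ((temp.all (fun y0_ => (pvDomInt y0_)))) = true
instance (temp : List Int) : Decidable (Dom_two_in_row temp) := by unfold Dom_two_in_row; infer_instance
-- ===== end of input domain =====

-- B replaces A's index-stepping while loop (i += 2, slicing out each pair) by a single
-- enumerate pass that opens a new group on even indices and appends to the last group on odd ones.

-- ===== PORT A =====
-- A's while loop over index i (i += 2 each iteration); temp[i] and temp[i+1] are
-- in range whenever read, so List.getElem with the proof is exact.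
def twoInRowLoopA (temp : List Int) (i : Nat) : List (List Int) :=
  if h : i < temp.length then
    let arr := [temp[i]]
    let arr := if h2 : i + 1 < temp.length then arr ++ [temp[i + 1]] else arr
    arr :: twoInRowLoopA temp (i + 2)
  else []
termination_by temp.length - i

def two_in_row (temp : List Int) : List (List Int) :=
  twoInRowLoopA temp 0

-- ===== PORT B =====
-- B's loop body: even index → start a new group; odd index → append to the last group
-- (tem_data[-1].append(x) = replace the last group by itself with x appended).
def twoInRowStepB (acc : List (List Int)) (p : Int × Int) : List (List Int) :=
  if p.1 % 2 == 0 then acc ++ [[p.2]]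
  else acc.dropLast ++ [(acc.getLast?.getD []) ++ [p.2]]

def two_in_row_alt (temp : List Int) : List (List Int) :=
  (PySem.List.enumerate temp).foldl twoInRowStepB []

-- ===== PRECONDITION & SPEC =====
def Spec_two_in_row (temp : List Int) (out : List (List Int)) : Prop := out = two_in_row_alt temp
instance (temp : List Int) (out : List (List Int)) : Decidable (Spec_two_in_row temp out) := by unfold Spec_two_in_row; infer_instance

-- ===== CLAIM (what is proved, stated in full; the proofs are below) =====
def Claim_equal_two_in_row : Prop := ∀ (temp : List Int), Dom_two_in_row temp → Spec_two_in_row temp (two_in_row temp)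

-- ===== LEMMAS AND PROOFS =====

-- reference chunking, two elements at a time
def chunk2 : List Int → List (List Int)
  | [] => []
  | [a] => [[a]]
  | a :: b :: rest => [a, b] :: chunk2 rest

theorem twoInRowLoopA_eq_chunk2 (temp : List Int) (i : Nat) :
    twoInRowLoopA temp i = chunk2 (temp.drop i) := by
  rw [twoInRowLoopA]
  by_cases h : i < temp.length
  · simp only [h, dif_pos]
    have h2cases : temp.drop i = temp[i] :: temp.drop (i + 1) := by
      rw [List.getElem_cons_drop]
    by_cases h2 : i + 1 < temp.length
    · have h3 : temp.drop (i + 1) = temp[i + 1] :: temp.drop (i + 2) := by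
        rw [List.getElem_cons_drop]
      rw [h2cases, h3]
      simp only [h2, dif_pos, chunk2]
      rw [twoInRowLoopA_eq_chunk2 temp (i + 2)]
      simp
    · have h3 : temp.drop (i + 1) = [] := by
        apply List.drop_eq_nil_of_le; omega
      rw [h2cases, h3]
      simp only [h2, dif_neg, not_false_iff, chunk2]
      have h4 : temp.drop (i + 2) = [] := by
        apply List.drop_eq_nil_of_le; omega
      rw [twoInRowLoopA_eq_chunk2 temp (i + 2), h4]
      simp [chunk2]
  · simp only [h, dif_neg, not_false_iff]
    rw [List.drop_eq_nil_of_le (by omega)]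
    simp [chunk2]
termination_by temp.length - i

-- B's fold invariant: starting from any accumulator at an even index, the fold
-- appends exactly chunk2 of the remaining elements.
theorem foldB_even (rest : List Int) (n : Int) (acc : List (List Int))
    (hn : n % 2 = 0) :
    (PySem.List.enumerate rest n).foldl twoInRowStepB acc = acc ++ chunk2 rest := by
  match rest with
  | [] => simp [PySem.List.enumerate_nil, chunk2]
  | [a] =>
    simp [PySem.List.enumerate_cons, PySem.List.enumerate_nil, chunk2,
      twoInRowStepB, hn]
  | a :: b :: rest =>
    rw [PySem.List.enumerate_cons, PySem.List.enumerate_cons]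
    simp only [List.foldl_cons]
    have hstep1 : twoInRowStepB acc (n, a) = acc ++ [[a]] := by
      simp [twoInRowStepB, hn]
    have hodd : (n + 1) % 2 ≠ 0 := by omega
    have hstep2 : twoInRowStepB (acc ++ [[a]]) (n + 1, b) = acc ++ [[a, b]] := by
      simp [twoInRowStepB, hodd]
    rw [hstep1, hstep2]
    have hrec := foldB_even rest (n + 1 + 1) (acc ++ [[a, b]]) (by omega)
    rw [hrec, chunk2]
    simp

theorem alt_eq_chunk2 (temp : List Int) : two_in_row_alt temp = chunk2 temp := by
  unfold two_in_row_alt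
  rw [foldB_even temp 0 [] (by norm_num)]
  simp

-- ===== VERDICT (by name: the statement is the Claim_ definition above) =====
theorem two_in_row_spec : Claim_equal_two_in_row := by
  intro temp _
  unfold Spec_two_in_row two_in_row
  rw [twoInRowLoopA_eq_chunk2, alt_eq_chunk2]
  simp
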